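-- pv_equiv track=rewrite | github.com/daviortega/bitk3 | bitk3/concatMultipleFasta.py | _buildPartFileRaxml
-- ===== SOURCE A (Python) =====
-- def _buildPartFileRaxml(msaList=[]):
--     """It will read the list of CCDs and build a partitioning file for RAxML
--     Keyword arguments:
--     msaList -- list of [dictionary, listOfheaders] msa.
--     Returns string to be writen in file.
--     """
--
--     partFileRaxml = ''
--     startCoord = 1
--     partNum = 1
--
--     for seqDic, seqList in msaList:
--         endCoord = len(seqDic[seqList[0]]) - 1 + startCoord
--         partFileRaxml += 'AUTO, part{} = {}-{}\n'.format(
--             partNum,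
--             startCoord,
--             endCoord
--         )
--         startCoord = endCoord + 1
--         partNum += 1
--
--     return partFileRaxml
-- ===== SOURCE B (Python) =====
-- from itertools import accumulate
--
--
-- def _buildPartFileRaxml(msaList=[]):
--     """Build the RAxML partition file string from MSA lengths.
--
--     Two-pass decomposition: first compute the part lengths and their
--     cumulative end coordinates, then format all lines in one pass.
--     """
--     lens = [len(seqDic[seqList[0]]) for seqDic, seqList in msaList]
--     ends = list(accumulate(lens))
--     return ''.join(
--         'AUTO, part{} = {}-{}\n'.format(i, end - ln + 1, end)
--         for i, (ln, end) in enumerate(zip(lens, ends), 1)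
--     )
-- ===== Notes on version B (the rewrite author's own statement) =====
-- stated objective: alternative
-- what changed: B replaces A's single loop that threads a running start coordinate and part counter through string concatenation with a two-pass table construction: a list of part lengths, itertools.accumulate for the cumulative end coordinates, then one formatting pass with enumerate and ''.join.
import Mathlib
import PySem

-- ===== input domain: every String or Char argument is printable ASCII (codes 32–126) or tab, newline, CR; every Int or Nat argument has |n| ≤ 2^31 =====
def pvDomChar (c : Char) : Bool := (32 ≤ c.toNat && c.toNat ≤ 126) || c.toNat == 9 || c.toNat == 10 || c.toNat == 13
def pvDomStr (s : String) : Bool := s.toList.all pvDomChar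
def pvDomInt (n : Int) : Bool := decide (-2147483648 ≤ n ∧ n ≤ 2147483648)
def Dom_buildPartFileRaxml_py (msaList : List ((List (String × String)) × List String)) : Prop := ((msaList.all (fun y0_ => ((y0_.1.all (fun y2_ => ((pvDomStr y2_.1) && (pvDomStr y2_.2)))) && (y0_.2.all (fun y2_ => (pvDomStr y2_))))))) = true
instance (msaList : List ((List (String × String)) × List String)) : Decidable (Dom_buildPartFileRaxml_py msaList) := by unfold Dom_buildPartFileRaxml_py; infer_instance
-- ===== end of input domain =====

-- B builds a boundary table (part lengths, cumulative end coordinates) first and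
-- formats all lines in a second pass, instead of A's single loop threading a
-- running start coordinate and part counter; objective: alternative decomposition.

-- ===== PORT A =====
-- seqDic[seqList[0]] (shared by both Pythons verbatim); defaults are unreachable under Pre_
def pvSeq0 (p : (List (String × String)) × List String) : String :=
  ((PySem.Dict.mk p.1).get? ((PySem.List.pyGet? p.2 0).getD "")).getD ""

def buildPartFileRaxml_py (msaList : List ((List (String × String)) × List String)) : String :=
  (msaList.foldl
    (fun (st : String × Int × Int) p =>
      let endCoord : Int := PySem.Str.len (pvSeq0 p) - 1 + st.2.1
      (st.1 ++ "AUTO, part" ++ PySem.Int.toStr st.2.2 ++ " = " ++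
         PySem.Int.toStr st.2.1 ++ "-" ++ PySem.Int.toStr endCoord ++ "\n",
       endCoord + 1, st.2.2 + 1))
    ("", 1, 1)).1

-- ===== PORT B =====
-- itertools.accumulate on the length list (running sum from acc)
def pvAccumulate : List Int → Int → List Int
  | [], _ => []
  | l :: ls, acc => (acc + l) :: pvAccumulate ls (acc + l)

def buildPartFileRaxml_py_alt (msaList : List ((List (String × String)) × List String)) : String :=
  let lens := msaList.map (fun p => PySem.Str.len (pvSeq0 p))
  let ends := pvAccumulate lens 0
  String.join ((PySem.List.enumerate (lens.zip ends) 1).map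
    (fun x => "AUTO, part" ++ PySem.Int.toStr x.1 ++ " = " ++
      PySem.Int.toStr (x.2.2 - x.2.1 + 1) ++ "-" ++ PySem.Int.toStr x.2.2 ++ "\n"))

-- ===== PRECONDITION & SPEC =====
-- Pre_ excludes exactly the inputs where A raises: an entry whose header list is
-- empty (IndexError on seqList[0]) or whose first header is not a key of seqDic (KeyError).
def Pre_buildPartFileRaxml_py (msaList : List ((List (String × String)) × List String)) : Prop :=
  ∀ p ∈ msaList, ((PySem.List.pyGet? p.2 0).bind (fun k => (PySem.Dict.mk p.1).get? k)).isSome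

instance (msaList : List ((List (String × String)) × List String)) : Decidable (Pre_buildPartFileRaxml_py msaList) := by unfold Pre_buildPartFileRaxml_py; infer_instance

def pvWitness_buildPartFileRaxml_py : (List ((List (String × String)) × List String)) :=
  [([("a", "ACGT")], ["a"]), ([("b", "AC")], ["b"])]

def Spec_buildPartFileRaxml_py (msaList : List ((List (String × String)) × List String)) (out : String) : Prop := out = buildPartFileRaxml_py_alt msaList
instance (msaList : List ((List (String × String)) × List String)) (out : String) : Decidable (Spec_buildPartFileRaxml_py msaList out) := by unfold Spec_buildPartFileRaxml_py; infer_instance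

-- ===== CLAIM (what is proved, stated in full; the proofs are below) =====
def Claim_equal_buildPartFileRaxml_py : Prop := ∀ (msaList : List ((List (String × String)) × List String)), Dom_buildPartFileRaxml_py msaList → Pre_buildPartFileRaxml_py msaList → Spec_buildPartFileRaxml_py msaList (buildPartFileRaxml_py msaList)

-- ===== LEMMAS AND PROOFS =====

lemma pvFoldlStrAppend (xs : List String) (a : String) :
    xs.foldl (· ++ ·) a = a ++ xs.foldl (· ++ ·) "" := by
  induction xs generalizing a with
  | nil => simp
  | cons x xs ih =>
    simp only [List.foldl_cons]
    rw [ih (a ++ x), ih ("" ++ x)]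
    simp [String.append_assoc]

lemma pvJoinCons (x : String) (xs : List String) :
    String.join (x :: xs) = x ++ String.join xs := by
  simp only [String.join, List.foldl_cons]
  rw [pvFoldlStrAppend]
  simp

lemma pvMain (l : List ((List (String × String)) × List String)) (s : String) (c i : Int) :
    (l.foldl
      (fun (st : String × Int × Int) p =>
        let endCoord : Int := PySem.Str.len (pvSeq0 p) - 1 + st.2.1
        (st.1 ++ "AUTO, part" ++ PySem.Int.toStr st.2.2 ++ " = " ++
           PySem.Int.toStr st.2.1 ++ "-" ++ PySem.Int.toStr endCoord ++ "\n",
         endCoord + 1, st.2.2 + 1))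
      (s, c, i)).1
    = s ++ String.join ((PySem.List.enumerate
        ((l.map (fun p => PySem.Str.len (pvSeq0 p))).zip
          (pvAccumulate (l.map (fun p => PySem.Str.len (pvSeq0 p))) (c - 1))) i).map
        (fun x => "AUTO, part" ++ PySem.Int.toStr x.1 ++ " = " ++
          PySem.Int.toStr (x.2.2 - x.2.1 + 1) ++ "-" ++ PySem.Int.toStr x.2.2 ++ "\n")) := by
  induction l generalizing s c i with
  | nil => simp [pvAccumulate, String.join]
  | cons p rest ih =>
    simp only [List.foldl_cons, List.map_cons, pvAccumulate, List.zip_cons_cons,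
      PySem.List.enumerate_cons, List.map_cons, pvJoinCons]
    rw [ih]
    have h1 : c - 1 + PySem.Str.len (pvSeq0 p) = PySem.Str.len (pvSeq0 p) - 1 + c := by ring
    have h2 : PySem.Str.len (pvSeq0 p) - 1 + c + 1 - 1 = c - 1 + PySem.Str.len (pvSeq0 p) := by ring
    have h3 : c - 1 + PySem.Str.len (pvSeq0 p) - PySem.Str.len (pvSeq0 p) + 1 = c := by ring
    rw [h2, h3, ← h1]
    simp [String.append_assoc]

-- ===== VERDICT (by name: the statement is the Claim_ definition above) =====
theorem buildPartFileRaxml_py_spec : Claim_equal_buildPartFileRaxml_py := by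
  intro msaList _ _
  unfold Spec_buildPartFileRaxml_py buildPartFileRaxml_py buildPartFileRaxml_py_alt
  rw [pvMain]
  norm_num
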